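-- pv_equiv track=rewrite | github.com/applepiinc/arithmaticthinking | maze/pygame_mazesolver_BFS_demomode.py | find_coordinate
-- ===== SOURCE A (Python) =====
-- startX = 11
--
-- startY = 0
--
-- def find_coordinate(moves):
--     j = startX
--     i = startY
--     for move in moves:
--         if move == "L":
--             j -= 1
--
--         elif move == "R":
--             j += 1
--
--         elif move == "U":
--             i -= 1
--
--         elif move == "D":
--             i += 1
--
--     return (i, j)
-- ===== SOURCE B (Python) =====
-- startX = 11
--
-- startY = 0
--
-- def find_coordinate(moves):
--     i = startY + moves.count("D") - moves.count("U")
--     j = startX + moves.count("R") - moves.count("L")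
--     return (i, j)
-- ===== Notes on version B (the rewrite author's own statement) =====
-- stated objective: simpler
-- what changed: Replaces the four-branch mutating loop with closed-form arithmetic over character counts (count of D/U/R/L).
import Mathlib
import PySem

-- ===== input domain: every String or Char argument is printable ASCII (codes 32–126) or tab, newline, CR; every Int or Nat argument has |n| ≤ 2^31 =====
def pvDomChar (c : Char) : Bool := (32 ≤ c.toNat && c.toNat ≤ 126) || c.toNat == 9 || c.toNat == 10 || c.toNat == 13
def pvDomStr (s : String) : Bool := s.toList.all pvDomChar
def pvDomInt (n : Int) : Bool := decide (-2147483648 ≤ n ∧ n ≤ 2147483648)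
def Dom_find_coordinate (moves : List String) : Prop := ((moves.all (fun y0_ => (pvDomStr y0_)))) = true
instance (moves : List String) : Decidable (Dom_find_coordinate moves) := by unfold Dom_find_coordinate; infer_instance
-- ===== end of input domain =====

-- B replaces A's four-branch accumulator loop with closed-form arithmetic over counts of "D"/"U"/"R"/"L" (objective: simpler).


-- ===== PORT A =====
-- startX = 11, startY = 0 (module constants)
def pvStartX : Int := 11
def pvStartY : Int := 0

def find_coordinate (moves : List String) : Int × Int :=
  let ij := moves.foldl (fun (s : Int × Int) move =>
    let (i, j) := s
    if move == "L" then (i, j - 1)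
    else if move == "R" then (i, j + 1)
    else if move == "U" then (i - 1, j)
    else if move == "D" then (i + 1, j)
    else (i, j)) (pvStartY, pvStartX)
  (ij.1, ij.2)

-- ===== PORT B =====
def find_coordinate_alt (moves : List String) : Int × Int :=
  let i : Int := pvStartY + PySem.List.count moves "D" - PySem.List.count moves "U"
  let j : Int := pvStartX + PySem.List.count moves "R" - PySem.List.count moves "L"
  (i, j)

-- ===== PRECONDITION & SPEC =====
def Spec_find_coordinate (moves : List String) (out : Int × Int) : Prop := out = find_coordinate_alt moves
instance (moves : List String) (out : Int × Int) : Decidable (Spec_find_coordinate moves out) := by unfold Spec_find_coordinate; infer_instance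

-- ===== CLAIM (what is proved, stated in full; the proofs are below) =====
def Claim_equal_find_coordinate : Prop := ∀ (moves : List String), Dom_find_coordinate moves → Spec_find_coordinate moves (find_coordinate moves)

-- ===== LEMMAS AND PROOFS =====

-- ===== VERDICT (by name: the statement is the Claim_ definition above) =====
lemma find_coordinate_loop (moves : List String) (i j : Int) :
    moves.foldl (fun (s : Int × Int) move =>
      let (i, j) := s
      if move == "L" then (i, j - 1)
      else if move == "R" then (i, j + 1)
      else if move == "U" then (i - 1, j)
      else if move == "D" then (i + 1, j)
      else (i, j)) (i, j)
    = (i + (moves.count "D" : Int) - (moves.count "U" : Int),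
       j + (moves.count "R" : Int) - (moves.count "L" : Int)) := by
  induction moves generalizing i j with
  | nil => simp
  | cons m rest ih =>
    simp only [List.foldl_cons, List.count_cons]
    by_cases hL : m = "L" <;> by_cases hR : m = "R" <;> by_cases hU : m = "U" <;>
      by_cases hD : m = "D" <;>
      simp_all [ih] <;> ring_nf

-- ===== VERDICT (by name: the statement is the Claim_ definition above) =====
theorem find_coordinate_spec : Claim_equal_find_coordinate := by
  intro moves _
  unfold Spec_find_coordinate find_coordinate find_coordinate_alt
  simp only [find_coordinate_loop, PySem.List.count_eq]
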